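-- pv_equiv track=rewrite | github.com/geoffitect/voynich | scripts/01_parsing/tokenizer.py | tokenize_word
-- ===== SOURCE A (Python) =====
-- SEGMENT_RULES = [
--     # 4-char
--     ('aiii', 'V_AIII'),    # overlong vowel
--     ('eeey', None),        # handle as eee + y
--     # 3-char trigraphs
--     ('cth', 'C_CTH'),      # gallows cartouche: ch + t-modifier
--     ('ckh', 'C_CKH'),      # gallows cartouche: ch + k-modifier
--     ('cph', 'C_CPH'),      # gallows cartouche: ch + p-modifier
--     ('cfh', 'C_CFH'),      # gallows cartouche: ch + f-modifier
--     ('eee', 'V_EEE'),      # triple-e (overlong)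
--     ('aii', 'V_AII'),      # long ai-diphthong
--     # 2-char digraphs
--     ('ch', 'C_CH'),        # the core c-ligature
--     ('sh', 'C_SH'),        # s + h digraph
--     ('qo', 'C_QO'),        # q + o fused unit
--     ('ee', 'V_EE'),        # long-e vowel
--     ('ai', 'V_AI'),        # short ai-diphthong
-- ]
--
-- SINGLE_TOKENS = {
--     'o': 'V_O',
--     'e': 'V_E',
--     'y': 'V_Y',
--     'a': 'V_A',
--     'i': 'V_I',       # rare outside ai/aii sequences
--     'd': 'C_D',
--     'l': 'C_L',
--     'k': 'C_K',
--     'r': 'C_R',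
--     'n': 'C_N',
--     't': 'C_T',
--     's': 'C_S',
--     'p': 'C_P',
--     'f': 'C_F',
--     'm': 'C_M',
--     'g': 'C_G',
--     'q': 'C_Q',        # rare: q without following o
--     'h': 'X_H',        # rare: h outside digraphs
--     'c': 'X_C',        # extremely rare: c without following h/gallows
--     'x': 'X_X',
--     'j': 'X_J',
--     'b': 'X_B',
--     'u': 'X_U',
--     'v': 'X_V',
--     'z': 'X_Z',
--     '?': 'X_UNK',
-- }
--
-- def tokenize_word(eva_word: str) -> list[str]:
--     """Segment an EVA word into structural tokens using greedy matching."""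
--     tokens = []
--     i = 0
--     while i < len(eva_word):
--         matched = False
--         # Try longest segments first
--         for pattern, token_id in SEGMENT_RULES:
--             if token_id is None:
--                 continue
--             if eva_word[i:i+len(pattern)] == pattern:
--                 tokens.append(token_id)
--                 i += len(pattern)
--                 matched = True
--                 break
--         if not matched:
--             ch = eva_word[i]
--             token_id = SINGLE_TOKENS.get(ch, f'X_{ch.upper()}')
--             tokens.append(token_id)
--             i += 1
--     return tokens
-- ===== SOURCE B (Python) =====
-- SEGMENT_RULES = [
--     ('aiii', 'V_AIII'),
--     ('eeey', None),
--     ('cth', 'C_CTH'),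
--     ('ckh', 'C_CKH'),
--     ('cph', 'C_CPH'),
--     ('cfh', 'C_CFH'),
--     ('eee', 'V_EEE'),
--     ('aii', 'V_AII'),
--     ('ch', 'C_CH'),
--     ('sh', 'C_SH'),
--     ('qo', 'C_QO'),
--     ('ee', 'V_EE'),
--     ('ai', 'V_AI'),
-- ]
--
-- SINGLE_TOKENS = {
--     'o': 'V_O', 'e': 'V_E', 'y': 'V_Y', 'a': 'V_A', 'i': 'V_I',
--     'd': 'C_D', 'l': 'C_L', 'k': 'C_K', 'r': 'C_R', 'n': 'C_N',
--     't': 'C_T', 's': 'C_S', 'p': 'C_P', 'f': 'C_F', 'm': 'C_M',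
--     'g': 'C_G', 'q': 'C_Q', 'h': 'X_H', 'c': 'X_C', 'x': 'X_X',
--     'j': 'X_J', 'b': 'X_B', 'u': 'X_U', 'v': 'X_V', 'z': 'X_Z',
--     '?': 'X_UNK',
-- }
--
-- # Multi-char patterns indexed by the pattern string itself, storing the token and
-- # the advance width: three prefix probes replace the scan over SEGMENT_RULES.
-- MULTI = {p: (t, len(p)) for p, t in SEGMENT_RULES if t is not None}
--
-- def tokenize_word(eva_word: str) -> list[str]:
--     """Segment an EVA word into structural tokens (dict-indexed prefix probes)."""
--     out = []
--     i, length = 0, len(eva_word)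
--     while i < length:
--         hit = (MULTI.get(eva_word[i:i+4]) or MULTI.get(eva_word[i:i+3])
--                or MULTI.get(eva_word[i:i+2]))
--         if hit:
--             tok, n = hit
--             out.append(tok)
--             i += n
--         else:
--             ch = eva_word[i]
--             out.append(SINGLE_TOKENS.get(ch, 'X_' + ch.upper()))
--             i += 1
--     return out
-- ===== Notes on version B (the rewrite author's own statement) =====
-- stated objective: faster
-- what changed: Replaces A's per-position scan over the 13 SEGMENT_RULES (slice-compare each, with a matched flag) by a dict keyed by the multi-char pattern itself (value = token and advance width) probed with just the 4/3/2-char prefixes via an or-chain.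
import Mathlib
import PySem

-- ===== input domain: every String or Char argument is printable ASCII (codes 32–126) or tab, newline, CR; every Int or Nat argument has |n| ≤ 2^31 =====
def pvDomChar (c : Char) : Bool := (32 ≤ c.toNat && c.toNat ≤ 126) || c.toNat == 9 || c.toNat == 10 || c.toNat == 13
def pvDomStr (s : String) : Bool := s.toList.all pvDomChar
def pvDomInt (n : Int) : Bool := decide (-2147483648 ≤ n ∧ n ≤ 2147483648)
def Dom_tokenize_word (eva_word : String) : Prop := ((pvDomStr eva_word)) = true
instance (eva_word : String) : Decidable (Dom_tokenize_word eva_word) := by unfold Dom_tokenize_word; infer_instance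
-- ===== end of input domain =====

-- B replaces A's per-position scan over the 13 SEGMENT_RULES by a dict keyed by
-- the multi-char pattern itself (value = token and advance width) probed with the
-- 4/3/2-char prefixes (objective: faster by a constant factor; same behaviour).

-- ===== PORT A =====
-- Module constants (shared by both Pythons). Python strings are represented as
-- List Char (the PySem convention for exact string reasoning).
def segmentRules : List (List Char × Option String) :=
  [ (['a','i','i','i'], some "V_AIII"),
    (['e','e','e','y'], none),
    (['c','t','h'], some "C_CTH"),
    (['c','k','h'], some "C_CKH"),
    (['c','p','h'], some "C_CPH"),
    (['c','f','h'], some "C_CFH"),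
    (['e','e','e'], some "V_EEE"),
    (['a','i','i'], some "V_AII"),
    (['c','h'], some "C_CH"),
    (['s','h'], some "C_SH"),
    (['q','o'], some "C_QO"),
    (['e','e'], some "V_EE"),
    (['a','i'], some "V_AI") ]

def singleTokens : PySem.Dict Char String :=
  PySem.Dict.ofList
    [ ('o', "V_O"), ('e', "V_E"), ('y', "V_Y"), ('a', "V_A"), ('i', "V_I"),
      ('d', "C_D"), ('l', "C_L"), ('k', "C_K"), ('r', "C_R"), ('n', "C_N"),
      ('t', "C_T"), ('s', "C_S"), ('p', "C_P"), ('f', "C_F"), ('m', "C_M"),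
      ('g', "C_G"), ('q', "C_Q"), ('h', "X_H"), ('c', "X_C"), ('x', "X_X"),
      ('j', "X_J"), ('b', "X_B"), ('u', "X_U"), ('v', "X_V"), ('z', "X_Z"),
      ('?', "X_UNK") ]

-- SINGLE_TOKENS.get(ch, 'X_' + ch.upper())  (identical expression in A and B)
def pvSingleTok (c : Char) : String :=
  PySem.Dict.getD singleTokens c ("X_" ++ PySem.Str.upper (String.ofList [c]))

-- A's inner `for pattern, token_id in SEGMENT_RULES` with continue/break:
-- returns the first non-None rule whose pattern equals eva_word[i:i+len(pattern)]
-- (for 0 ≤ i that Python slice is exactly (cs.drop i).take len, clamped past the end).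
def pvTryRules : List (List Char × Option String) → List Char → Option (String × Nat)
  | [], _ => none
  | (_, none) :: rest, s => pvTryRules rest s
  | (p, some t) :: rest, s =>
      if p = s.take p.length then some (t, p.length) else pvTryRules rest s

theorem pvTryRules_shape {rules : List (List Char × Option String)} {s : List Char}
    {t : String} {n : Nat} (h : pvTryRules rules s = some (t, n)) :
    ∃ p, (p, some t) ∈ rules ∧ n = p.length := by
  induction rules with
  | nil => simp [pvTryRules] at h
  | cons r rest ih =>
    obtain ⟨p, t?⟩ := r
    cases t? with
    | none =>
      simp only [pvTryRules] at h
      obtain ⟨q, hq, hn⟩ := ih h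
      exact ⟨q, by simp [hq], hn⟩
    | some u =>
      simp only [pvTryRules] at h
      split at h
      · cases h
        exact ⟨p, by simp, rfl⟩
      · obtain ⟨q, hq, hn⟩ := ih h
        exact ⟨q, by simp [hq], hn⟩

theorem pvTryRules_pos {s : List Char} {t : String} {n : Nat}
    (h : pvTryRules segmentRules s = some (t, n)) : 1 ≤ n := by
  obtain ⟨p, hp, hn⟩ := pvTryRules_shape h
  have : ∀ r ∈ segmentRules, 1 ≤ r.1.length := by decide
  have := this (p, some t) hp
  simpa [hn] using this

-- A's while-loop: index i over eva_word, tokens accumulator.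
def pvGoA (cs : List Char) (i : Nat) (tokens : List String) : List String :=
  if h : i < cs.length then
    match hm : pvTryRules segmentRules (cs.drop i) with
    | some (t, n) => pvGoA cs (i + n) (tokens ++ [t])
    | none => pvGoA cs (i + 1) (tokens ++ [pvSingleTok cs[i]])
  else tokens
termination_by cs.length - i
decreasing_by
  · have := pvTryRules_pos hm
    omega
  · omega

def tokenize_word (eva_word : String) : List String :=
  pvGoA eva_word.toList 0 []

-- ===== PORT B =====
-- MULTI = {p: (t, len(p)) for p, t in SEGMENT_RULES if t is not None}
def pvMulti : PySem.Dict (List Char) (String × Nat) :=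
  PySem.Dict.ofList
    (segmentRules.filterMap (fun pt => pt.2.map (fun t => (pt.1, (t, pt.1.length)))))

-- MULTI.get(w[i:i+4]) or MULTI.get(w[i:i+3]) or MULTI.get(w[i:i+2])
-- (s is the rest of the word; the Python slices are the clamped 4/3/2-char
-- prefixes (s.take n), and `x or y` on Optionals is Option.or).
def pvProbe (s : List Char) : Option (String × Nat) :=
  ((PySem.Dict.get? pvMulti (s.take 4)).or
    (PySem.Dict.get? pvMulti (s.take 3))).or
    (PySem.Dict.get? pvMulti (s.take 2))

theorem pvGet?_nil {κ ν : Type} [BEq κ] (x : κ) :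
    (PySem.Dict.mk ([] : List (κ × ν))).get? x = none := by
  simp [PySem.Dict.get?]

theorem pvGet?_mem_snd {κ ν : Type} [BEq κ] (l : List (κ × ν)) (x : κ) (v : ν)
    (h : (PySem.Dict.mk l).get? x = some v) : v ∈ l.map Prod.snd := by
  induction l with
  | nil => rw [pvGet?_nil] at h; cases h
  | cons p rest ih =>
    obtain ⟨k1, v1⟩ := p
    rw [PySem.Dict.get?_mk_cons] at h
    split at h
    · cases h; simp
    · simpa using Or.inr (ih h)

theorem pvMulti_snd_pos {q : List Char} {t : String} {n : Nat}
    (h : pvMulti.get? q = some (t, n)) : 1 ≤ n := by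
  have hM : pvMulti = PySem.Dict.mk
    [ (['a','i','i','i'], ("V_AIII", 4)), (['c','t','h'], ("C_CTH", 3)),
      (['c','k','h'], ("C_CKH", 3)), (['c','p','h'], ("C_CPH", 3)),
      (['c','f','h'], ("C_CFH", 3)), (['e','e','e'], ("V_EEE", 3)),
      (['a','i','i'], ("V_AII", 3)), (['c','h'], ("C_CH", 2)), (['s','h'], ("C_SH", 2)),
      (['q','o'], ("C_QO", 2)), (['e','e'], ("V_EE", 2)), (['a','i'], ("V_AI", 2)) ] := by rfl
  rw [hM] at h
  have hmem := pvGet?_mem_snd _ _ _ h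
  have hall : ∀ v ∈ ([ (['a','i','i','i'], ("V_AIII", 4)), (['c','t','h'], ("C_CTH", 3)),
      (['c','k','h'], ("C_CKH", 3)), (['c','p','h'], ("C_CPH", 3)),
      (['c','f','h'], ("C_CFH", 3)), (['e','e','e'], ("V_EEE", 3)),
      (['a','i','i'], ("V_AII", 3)), (['c','h'], ("C_CH", 2)), (['s','h'], ("C_SH", 2)),
      (['q','o'], ("C_QO", 2)), (['e','e'], ("V_EE", 2)),
      (['a','i'], ("V_AI", 2)) ] : List (List Char × (String × Nat))).map Prod.snd,
      1 ≤ v.2 := by decide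
  exact hall _ hmem

theorem pvProbe_pos {s : List Char} {t : String} {n : Nat}
    (h : pvProbe s = some (t, n)) : 1 ≤ n := by
  unfold pvProbe at h
  rcases h4 : PySem.Dict.get? pvMulti (s.take 4) with _ | v4
  · rcases h3 : PySem.Dict.get? pvMulti (s.take 3) with _ | v3
    · rw [h4, h3] at h
      simp only [Option.or] at h
      exact pvMulti_snd_pos h
    · rw [h4, h3] at h
      simp only [Option.or] at h
      cases h
      exact pvMulti_snd_pos h3
  · rw [h4] at h
    simp only [Option.or] at h
    cases h
    exact pvMulti_snd_pos h4

-- B's while-loop: index i, out accumulator, dict probes.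
def pvGoBLoop (cs : List Char) (i : Nat) (out : List String) : List String :=
  if h : i < cs.length then
    match hm : pvProbe (cs.drop i) with
    | some (tok, n) => pvGoBLoop cs (i + n) (out ++ [tok])
    | none => pvGoBLoop cs (i + 1) (out ++ [pvSingleTok cs[i]])
  else out
termination_by cs.length - i
decreasing_by
  · have := pvProbe_pos hm
    omega
  · omega

def tokenize_word_alt (eva_word : String) : List String :=
  pvGoBLoop eva_word.toList 0 []

-- ===== PRECONDITION & SPEC =====
def Spec_tokenize_word (eva_word : String) (out : List String) : Prop := out = tokenize_word_alt eva_word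
instance (eva_word : String) (out : List String) : Decidable (Spec_tokenize_word eva_word out) := by unfold Spec_tokenize_word; infer_instance

-- ===== CLAIM (what is proved, stated in full; the proofs are below) =====
def Claim_equal_tokenize_word : Prop := ∀ (eva_word : String), Dom_tokenize_word eva_word → Spec_tokenize_word eva_word (tokenize_word eva_word)

-- ===== LEMMAS AND PROOFS =====

theorem pvOr_ite {α : Type} (C : Prop) [Decidable C] (v : α) (x y : Option α) :
    ((if C then some v else x).or y) = if C then some v else (x.or y) := by
  split_ifs <;> simp

theorem pvOr_or_self {α : Type} (x y : Option α) : x.or (x.or y) = x.or y := by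
  cases x <;> simp

theorem pvOr_self {α : Type} (x : Option α) : x.or x = x := by
  cases x <;> simp

set_option maxHeartbeats 1000000 in
-- A's first matching rule and B's or-chain of prefix probes produce the same hit.
theorem pvProbe_eq (a : Char) (rest : List Char) :
    pvProbe (a :: rest) = pvTryRules segmentRules (a :: rest) := by
  have hM : pvMulti = PySem.Dict.mk
    [ (['a','i','i','i'], ("V_AIII", 4)), (['c','t','h'], ("C_CTH", 3)),
      (['c','k','h'], ("C_CKH", 3)), (['c','p','h'], ("C_CPH", 3)),
      (['c','f','h'], ("C_CFH", 3)), (['e','e','e'], ("V_EEE", 3)),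
      (['a','i','i'], ("V_AII", 3)), (['c','h'], ("C_CH", 2)), (['s','h'], ("C_SH", 2)),
      (['q','o'], ("C_QO", 2)), (['e','e'], ("V_EE", 2)), (['a','i'], ("V_AI", 2)) ] := by rfl
  rcases rest with _ | ⟨b, _ | ⟨c, _ | ⟨d, rest⟩⟩⟩ <;>
  · simp only [pvProbe, List.take_succ_cons, List.take_nil, List.take_zero]
    try simp only [pvOr_or_self, pvOr_self]
    simp only [hM, PySem.Dict.get?_mk_cons, pvGet?_nil, pvTryRules, segmentRules,
      beq_iff_eq, List.cons.injEq, List.nil_eq, reduceCtorEq, and_false, false_and, and_true,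
      List.take_succ_cons, List.take_nil, List.take_zero,
      List.length_cons, List.length_nil, reduceIte, Nat.reduceAdd,
      pvOr_ite, Option.none_or, Option.or_none]

theorem pvProbe_eq' (s : List Char) (hs : s ≠ []) :
    pvProbe s = pvTryRules segmentRules s := by
  rcases s with _ | ⟨a, rest⟩
  · exact absurd rfl hs
  · exact pvProbe_eq a rest

theorem pvGoA_eq (k : Nat) (cs : List Char) (i : Nat) (acc : List String)
    (hk : cs.length - i ≤ k) : pvGoA cs i acc = pvGoBLoop cs i acc := by
  induction k generalizing i acc with
  | zero =>
    have h : ¬ i < cs.length := by omega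
    rw [pvGoA, dif_neg h, pvGoBLoop, dif_neg h]
  | succ k ih =>
    by_cases h : i < cs.length
    · have hs : cs.drop i ≠ [] := by
        simp [List.drop_eq_nil_iff]; omega
      rw [pvGoA, dif_pos h, pvGoBLoop, dif_pos h]
      split
      · rename_i t n heq
        split
        · rename_i t' n' heq'
          rw [pvProbe_eq' _ hs, heq] at heq'
          obtain ⟨rfl, rfl⟩ : t = t' ∧ n = n' := by simpa using heq'
          exact ih _ _ (by have := pvTryRules_pos heq; omega)
        · rename_i heq'
          rw [pvProbe_eq' _ hs, heq] at heq'
          cases heq'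
      · rename_i heq
        split
        · rename_i t' n' heq'
          rw [pvProbe_eq' _ hs, heq] at heq'
          cases heq'
        · exact ih _ _ (by omega)
    · rw [pvGoA, dif_neg h, pvGoBLoop, dif_neg h]

-- ===== VERDICT (by name: the statement is the Claim_ definition above) =====
theorem tokenize_word_spec : Claim_equal_tokenize_word := by
  intro w _
  unfold Spec_tokenize_word tokenize_word tokenize_word_alt
  exact pvGoA_eq w.toList.length w.toList 0 [] (by omega)
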